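-- pv_equiv track=rewrite | github.com/SergioAdriel/DyAA-1507-2025-1 | Tareas/problemaPlumones.py | se_puede_formar
-- ===== SOURCE A (Python) =====
-- def se_puede_formar(n):
--     # Inicializar una lista booleana para almacenar si se puede formar cada número de plumas
--     dp = [False] * (n + 1)
--     dp[0] = True  # Es posible formar 0 plumas (no comprar ningún paquete)
--
--     # Paquetes disponibles
--     paquetes = [5, 8, 24]
--
--     # Llenar la lista dp
--     for i in range(1, n + 1):
--         for paquete in paquetes:
--             if i >= paquete and dp[i - paquete]:
--                 dp[i] = True
--                 break
--
--     return dp[n]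
-- ===== SOURCE B (Python) =====
-- # Any package count from {5, 8, 24} is a sum of 5s and 8s (24 = 3*8), whose
-- # Frobenius number is 27: every n >= 28 is representable, and below that only
-- # the fixed set of gaps is not.  O(1) set lookup instead of A's O(n) DP table.
-- _NONREP = frozenset({1, 2, 3, 4, 6, 7, 9, 11, 12, 14, 17, 19, 22, 27})
--
-- def se_puede_formar(n):
--     return n >= 0 and n not in _NONREP
-- ===== Notes on version B (the rewrite author's own statement) =====
-- stated objective: faster
-- what changed: Replaces the O(n) DP table over packages {5,8,24} with an O(1) closed form: since 24=3*8, n is formable iff n>=0 and n is not one of the 14 gaps of the numerical semigroup <5,8> (Frobenius number 27).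
import Mathlib
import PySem

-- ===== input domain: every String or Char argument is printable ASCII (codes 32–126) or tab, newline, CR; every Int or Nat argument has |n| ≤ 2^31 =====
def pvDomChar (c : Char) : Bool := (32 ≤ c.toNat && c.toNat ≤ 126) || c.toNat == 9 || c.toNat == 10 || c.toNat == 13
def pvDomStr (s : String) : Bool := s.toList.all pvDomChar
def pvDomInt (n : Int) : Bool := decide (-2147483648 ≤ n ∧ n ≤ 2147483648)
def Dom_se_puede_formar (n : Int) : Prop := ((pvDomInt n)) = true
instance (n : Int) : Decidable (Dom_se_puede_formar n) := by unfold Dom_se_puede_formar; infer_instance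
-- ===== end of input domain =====

-- B replaces A's O(n) DP over packages {5,8,24} by an O(1) lookup in the fixed
-- set of non-representable counts of <5,8> (Frobenius number 27).

-- ===== PORT A =====
-- one iteration of A's outer loop body (the inner for/break is a find?-first match);
-- dp is an Array like Python's list; all indices are in range under Pre_, where getD/setIfInBounds are exact
def pvStep (dp : Array Bool) (i : Int) : Array Bool :=
  match ([5, 8, 24] : List Int).find? (fun p => decide (p ≤ i) && dp.getD (i - p).toNat false) with
  | some _ => dp.setIfInBounds i.toNat true
  | none => dp

def se_puede_formar (n : Int) : Bool :=
  let dp : Array Bool := Array.replicate (n + 1).toNat false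
  let dp := dp.setIfInBounds 0 true
  let dp := (PySem.List.pyRange 1 (n + 1) 1).foldl pvStep dp
  dp.getD n.toNat false

-- ===== PORT B =====
def se_puede_formar_alt (n : Int) : Bool :=
  decide (0 ≤ n) && !(([1, 2, 3, 4, 6, 7, 9, 11, 12, 14, 17, 19, 22, 27] : List Int).contains n)

-- ===== PRECONDITION & SPEC =====
-- A indexes dp[0] into a list of length (n+1), so it raises IndexError for n < 0.
def Pre_se_puede_formar (n : Int) : Prop := 0 ≤ n
instance (n : Int) : Decidable (Pre_se_puede_formar n) := by unfold Pre_se_puede_formar; infer_instance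
def pvWitness_se_puede_formar : Int := (27)

def Spec_se_puede_formar (n : Int) (out : Bool) : Prop := out = se_puede_formar_alt n
instance (n : Int) (out : Bool) : Decidable (Spec_se_puede_formar n out) := by unfold Spec_se_puede_formar; infer_instance

-- ===== CLAIM (what is proved, stated in full; the proofs are below) =====
def Claim_equal_se_puede_formar : Prop := ∀ (n : Int), Dom_se_puede_formar n → Pre_se_puede_formar n → Spec_se_puede_formar n (se_puede_formar n)

-- ===== LEMMAS AND PROOFS =====

-- "j is representable": the closed form on Nat
def pvG (j : Nat) : Bool := decide (j ∉ ([1, 2, 3, 4, 6, 7, 9, 11, 12, 14, 17, 19, 22, 27] : List Nat))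

lemma pvG_large (j : Nat) (h : 28 ≤ j) : pvG j = true := by
  simp [pvG]
  omega

lemma pvG_rec (i : Nat) (h : 1 ≤ i) :
    ((decide (5 ≤ i) && pvG (i - 5)) || (decide (8 ≤ i) && pvG (i - 8)) ||
      (decide (24 ≤ i) && pvG (i - 24))) = pvG i := by
  by_cases h32 : i ≤ 32
  · interval_cases i <;> decide
  · rw [pvG_large i (by omega), pvG_large (i - 5) (by omega)]
    simp
    omega

-- the intended dp table of size N after processing indices 1..m
def pvVec (N m : Nat) : Array Bool :=
  (Array.range N).map (fun j => if j ≤ m then pvG j else false)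

lemma pvVec_zero (N : Nat) :
    (Array.replicate N false).setIfInBounds 0 true = pvVec N 0 := by
  apply Array.ext
  · simp [pvVec]
  · intro j h1 h2
    simp only [pvVec, Array.size_map, Array.size_range] at h2
    rw [Array.getElem_setIfInBounds (by simpa using h2)]
    simp only [pvVec, Array.getElem_map, Array.getElem_range, Array.getElem_replicate]
    by_cases hj : 0 = j
    · subst hj; simp [pvG]
    · rw [if_neg hj, if_neg (by omega : ¬ j ≤ 0)]

lemma pvVec_getD (N m j : Nat) (hj : j < N) :
    (pvVec N m).getD j false = if j ≤ m then pvG j else false := by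
  simp [Array.getD, pvVec]
  intro _ _
  exact hj

lemma pvStep_vec (N m : Nat) (h : m + 1 < N) :
    pvStep (pvVec N m) ((m : Int) + 1) = pvVec N (m + 1) := by
  unfold pvStep
  have hget : ∀ p : Nat, 1 ≤ p → p ≤ m + 1 → (((m : Int) + 1) - (p : Int)).toNat = m + 1 - p ∧
      (pvVec N m).getD (m + 1 - p) false = pvG (m + 1 - p) := by
    intro p hp1 hp
    refine ⟨by omega, ?_⟩
    rw [pvVec_getD N m _ (by omega), if_pos (by omega)]
  have key : (([5, 8, 24] : List Int).find? (fun p =>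
        decide (p ≤ (m : Int) + 1) && (pvVec N m).getD (((m : Int) + 1) - p).toNat false)).isSome
      = pvG (m + 1) := by
    rw [← pvG_rec (m + 1) (by omega)]
    simp only [List.find?]
    by_cases h5 : 5 ≤ m + 1
    · have h5i : ((5 : Int) ≤ (m : Int) + 1) := by omega
      obtain ⟨e5, v5⟩ := hget 5 (by omega) h5
      rw [show ((m : Int) + 1 - 5).toNat = ((m : Int) + 1 - ((5:Nat) : Int)).toNat from rfl, e5, v5]
      by_cases h8 : 8 ≤ m + 1
      · have h8i : ((8 : Int) ≤ (m : Int) + 1) := by omega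
        obtain ⟨e8, v8⟩ := hget 8 (by omega) h8
        rw [show ((m : Int) + 1 - 8).toNat = ((m : Int) + 1 - ((8:Nat) : Int)).toNat from rfl, e8, v8]
        by_cases h24 : 24 ≤ m + 1
        · have h24i : ((24 : Int) ≤ (m : Int) + 1) := by omega
          obtain ⟨e24, v24⟩ := hget 24 (by omega) h24
          rw [show ((m : Int) + 1 - 24).toNat = ((m : Int) + 1 - ((24:Nat) : Int)).toNat from rfl,
            e24, v24]
          simp only [decide_eq_true h5, decide_eq_true h5i, decide_eq_true h8,
            decide_eq_true h8i, decide_eq_true h24, decide_eq_true h24i, Bool.true_and]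
          cases pvG (m + 1 - 5) <;> cases pvG (m + 1 - 8) <;> cases pvG (m + 1 - 24) <;> simp
        · have h24i : ¬ ((24 : Int) ≤ (m : Int) + 1) := by omega
          simp only [decide_eq_true h5, decide_eq_true h5i, decide_eq_true h8,
            decide_eq_true h8i, decide_eq_false h24, decide_eq_false h24i, Bool.true_and,
            Bool.false_and, Bool.or_false]
          cases pvG (m + 1 - 5) <;> cases pvG (m + 1 - 8) <;> simp
      · have h8i : ¬ ((8 : Int) ≤ (m : Int) + 1) := by omega
        have h24 : ¬ 24 ≤ m + 1 := by omega
        have h24i : ¬ ((24 : Int) ≤ (m : Int) + 1) := by omega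
        simp only [decide_eq_true h5, decide_eq_true h5i, decide_eq_false h8,
          decide_eq_false h8i, decide_eq_false h24, decide_eq_false h24i, Bool.true_and,
          Bool.false_and, Bool.or_false]
        cases pvG (m + 1 - 5) <;> simp
    · have h5i : ¬ ((5 : Int) ≤ (m : Int) + 1) := by omega
      have h8 : ¬ 8 ≤ m + 1 := by omega
      have h8i : ¬ ((8 : Int) ≤ (m : Int) + 1) := by omega
      have h24 : ¬ 24 ≤ m + 1 := by omega
      have h24i : ¬ ((24 : Int) ≤ (m : Int) + 1) := by omega
      simp [decide_eq_false h5i, decide_eq_false h8i, decide_eq_false h24i]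
      exact ⟨⟨fun h' => absurd h' (by omega), fun h' => absurd h' (by omega)⟩,
        fun h' => absurd h' (by omega)⟩
  have hidx : ((m : Int) + 1).toNat = m + 1 := by omega
  cases hfind : (([5, 8, 24] : List Int).find? (fun p =>
      decide (p ≤ (m : Int) + 1) && (pvVec N m).getD (((m : Int) + 1) - p).toNat false)) with
  | some p =>
    rw [hfind] at key
    simp only [Option.isSome_some] at key
    simp only [hidx]
    apply Array.ext
    · simp [pvVec]
    · intro j h1 h2
      simp only [pvVec, Array.size_map, Array.size_range] at h2
      rw [Array.getElem_setIfInBounds (by simp [pvVec]; omega)]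
      simp only [pvVec, Array.getElem_map, Array.getElem_range]
      by_cases hj : m + 1 = j
      · subst hj
        rw [if_pos rfl, if_pos (le_refl (m + 1))]
        exact key
      · rw [if_neg hj]
        by_cases hjm : j ≤ m
        · rw [if_pos hjm, if_pos (by omega : j ≤ m + 1)]
        · rw [if_neg hjm, if_neg (by omega : ¬ j ≤ m + 1)]
  | none =>
    rw [hfind] at key
    simp only [Option.isSome_none] at key
    apply Array.ext
    · simp [pvVec]
    · intro j h1 h2
      simp only [pvVec, Array.getElem_map, Array.getElem_range]
      by_cases hjm : j ≤ m
      · rw [if_pos hjm, if_pos (by omega : j ≤ m + 1)]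
      · by_cases hj1 : j ≤ m + 1
        · have hje : j = m + 1 := by omega
          subst hje
          rw [if_neg hjm, if_pos hj1]
          exact key
        · rw [if_neg hjm, if_neg hj1]

lemma pv_fold (N m : Nat) (h : m < N) :
    ((List.range m).map (fun k : Nat => (1 : Int) + (k : Int))).foldl pvStep
      ((Array.replicate N false).setIfInBounds 0 true) = pvVec N m := by
  induction m with
  | zero => simpa using pvVec_zero N
  | succ m ih =>
    rw [List.range_succ, List.map_append, List.foldl_append, ih (by omega)]
    simp only [List.map_cons, List.map_nil, List.foldl_cons, List.foldl_nil]
    rw [show (1 : Int) + (m : Int) = (m : Int) + 1 by ring, pvStep_vec N m h]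

lemma alt_eq_pvG (n : Int) (hn : 0 ≤ n) : se_puede_formar_alt n = pvG n.toNat := by
  unfold se_puede_formar_alt pvG
  rw [decide_eq_true hn, Bool.true_and, List.contains_eq_mem, ← decide_not, decide_eq_decide]
  simp [List.mem_cons]
  omega

-- ===== VERDICT (by name: the statement is the Claim_ definition above) =====
theorem se_puede_formar_spec : Claim_equal_se_puede_formar := by
  intro n _ hpre
  unfold Spec_se_puede_formar
  have hpre' : (0 : Int) ≤ n := hpre
  show (((PySem.List.pyRange 1 (n + 1) 1).foldl pvStep
      ((Array.replicate (n + 1).toNat false).setIfInBounds 0 true)).getD n.toNat false)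
    = se_puede_formar_alt n
  rw [alt_eq_pvG n hpre']
  set m := n.toNat with hmdef
  have hN : (n + 1).toNat = m + 1 := by omega
  rw [hN, PySem.List.pyRange_one 1 (n + 1), (by omega : ((n + 1) - 1).toNat = m)]
  rw [pv_fold (m + 1) m (by omega)]
  rw [pvVec_getD (m + 1) m m (by omega), if_pos (le_refl m)]
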